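-- pv_equiv track=rewrite | github.com/damayant/Python | algo/arrays/sum_of_distance.py | sum_of_distance
-- ===== SOURCE A (Python) =====
-- from typing import List
--
-- def sum_of_distance(nums:List[int])->List[int]:
--     index_map=[0]*len(nums)
--     for i in range(len(nums)):
--         for j in range(i+1,len(nums)):
--             if nums[i] == nums[j]:
--                 index_map[i]+=abs(i-j)
--                 index_map[j]+=abs(i-j)
--     return index_map
-- ===== SOURCE B (Python) =====
-- from typing import List
--
--
-- def _pass(pairs):
--     # one forward sweep: out[k] = sum(i - i_t) over earlier pairs (i_t, v_t)
--     # with v_t == v, maintained as (count, sum-of-indices) per value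
--     out = []
--     stats = {}
--     for i, v in pairs:
--         c, s = stats.get(v, (0, 0))
--         out.append(c * i - s)
--         stats[v] = (c + 1, s + i)
--     return out
--
--
-- def sum_of_distance(nums: List[int]) -> List[int]:
--     pairs = list(enumerate(nums))
--     left = _pass(pairs)
--     right = _pass(pairs[::-1])
--     return [l - r for l, r in zip(left, reversed(right))]
-- ===== Notes on version B (the rewrite author's own statement) =====
-- stated objective: faster
-- what changed: Replaces A's O(n^2) scan over all index pairs by two linear sweeps that keep, per value, a running (count, sum-of-indices) in a dict, so each index gets count*i - sum from the left and symmetrically from the right.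
import Mathlib
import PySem

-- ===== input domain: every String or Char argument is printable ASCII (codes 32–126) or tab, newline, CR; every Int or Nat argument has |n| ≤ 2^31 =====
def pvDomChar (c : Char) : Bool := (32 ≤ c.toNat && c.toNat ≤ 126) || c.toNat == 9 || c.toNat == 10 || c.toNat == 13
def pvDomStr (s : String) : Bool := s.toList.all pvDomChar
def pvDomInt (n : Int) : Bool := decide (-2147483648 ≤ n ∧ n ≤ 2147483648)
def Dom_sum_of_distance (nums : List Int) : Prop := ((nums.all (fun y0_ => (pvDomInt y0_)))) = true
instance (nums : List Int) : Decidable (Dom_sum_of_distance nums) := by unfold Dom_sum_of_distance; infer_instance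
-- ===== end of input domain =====

-- B replaces A's quadratic pair scan by two linear sweeps that keep, per value, the
-- running (count, sum of indices) in a dict; equivalence of the return values is proved.

-- ===== PORT A =====
-- All list indices below are in range (0 ≤ i < len(nums)), so pyGetD / List.modify are
-- exact for nums[i] and index_map[i] += …
def sum_of_distance (nums : List Int) : List Int :=
  (PySem.List.pyRange 0 (nums.length : Int) 1).foldl (fun index_map i =>
    (PySem.List.pyRange (i + 1) (nums.length : Int) 1).foldl (fun index_map j =>
      if PySem.List.pyGetD nums i 0 = PySem.List.pyGetD nums j 0 then
        (index_map.modify i.toNat (· + |i - j|)).modify j.toNat (· + |i - j|)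
      else index_map) index_map)
    (List.replicate nums.length 0)

-- ===== PORT B =====
-- one forward sweep (Source B's _pass): out.append(c*i - s) with stats[v] = (count, sum of indices)
def pv_pass (pairs : List (Int × Int)) : List Int :=
  (pairs.foldl (fun (st : List Int × PySem.Dict Int (Int × Int)) p =>
      let cs := st.2.getD p.2 (0, 0)
      (st.1 ++ [cs.1 * p.1 - cs.2], st.2.insert p.2 (cs.1 + 1, cs.2 + p.1)))
    ([], PySem.Dict.empty)).1

def sum_of_distance_alt (nums : List Int) : List Int :=
  let pairs := PySem.List.enumerate nums
  let left := pv_pass pairs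
  let right := pv_pass pairs.reverse        -- pairs[::-1] is the reversed list (exact)
  (left.zip right.reverse).map (fun lr => lr.1 - lr.2)

-- ===== PRECONDITION & SPEC =====
def Spec_sum_of_distance (nums : List Int) (out : List Int) : Prop := out = sum_of_distance_alt nums
instance (nums : List Int) (out : List Int) : Decidable (Spec_sum_of_distance nums out) := by unfold Spec_sum_of_distance; infer_instance

-- ===== CLAIM (what is proved, stated in full; the proofs are below) =====
def Claim_equal_sum_of_distance : Prop := ∀ (nums : List Int), Dom_sum_of_distance nums → Spec_sum_of_distance nums (sum_of_distance nums)

-- ===== LEMMAS AND PROOFS =====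

-- the common reference value: out[k] = Σ_p (if p.2 = nums[k] then |k - p.1| else 0) over enumerate nums
def pvTerm (nums : List Int) (k : Nat) (p : Int × Int) : Int :=
  if p.2 = nums.getD k 0 then |(k : Int) - p.1| else 0

def pvTK (nums : List Int) (k : Nat) : Int :=
  ((PySem.List.enumerate nums).map (pvTerm nums k)).sum

def pvRef (nums : List Int) : List Int := (List.range nums.length).map (pvTK nums)

-- ---- A side ----

lemma pvA_fold_getElem (nums : List Int) (ps : List (Int × Int)) (m : List Int) (k : Nat) :
    (ps.foldl (fun im p =>
      if PySem.List.pyGetD nums p.1 0 = PySem.List.pyGetD nums p.2 0 then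
        (im.modify p.1.toNat (· + |p.1 - p.2|)).modify p.2.toNat (· + |p.1 - p.2|)
      else im) m)[k]?
    = m[k]?.map (· + (ps.map (fun p =>
        (if PySem.List.pyGetD nums p.1 0 = PySem.List.pyGetD nums p.2 0 ∧ p.1.toNat = k then |p.1 - p.2| else 0)
        + (if PySem.List.pyGetD nums p.1 0 = PySem.List.pyGetD nums p.2 0 ∧ p.2.toNat = k then |p.1 - p.2| else 0))).sum) := by
  induction ps generalizing m with
  | nil => cases h : m[k]? <;> simp [h]
  | cons p rest ih =>
    simp only [List.foldl_cons, List.map_cons, List.sum_cons, ih]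
    by_cases hc : PySem.List.pyGetD nums p.1 0 = PySem.List.pyGetD nums p.2 0
    · simp only [hc, if_true, true_and, List.getElem?_modify]
      cases h : m[k]? with
      | none => simp
      | some x =>
        by_cases h1 : p.1.toNat = k <;> by_cases h2 : p.2.toNat = k <;>
          simp [h1, h2] <;> ring_nf
    · simp [hc]

lemma pvPick (a b x : Int) (f : Int → Int) :
    ((PySem.List.pyRange a b 1).map (fun j => if j = x then f j else 0)).sum
    = if a ≤ x ∧ x < b then f x else 0 := by
  rw [List.sum_map_ite_eq]
  by_cases h : a ≤ x ∧ x < b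
  · have hmem : x ∈ PySem.List.pyRange a b 1 := (PySem.List.mem_pyRange_one).2 h
    have hc : (PySem.List.pyRange a b 1).count x = 1 :=
      List.count_eq_one_of_mem (PySem.List.nodup_pyRange_one a b) hmem
    simp [hc, h]
  · have hmem : x ∉ PySem.List.pyRange a b 1 := fun hm => h ((PySem.List.mem_pyRange_one).1 hm)
    simp [List.count_eq_zero_of_not_mem hmem, h]

lemma pv_sum_flatMap {α : Type} (l : List α) (f : α → List Int) :
    (l.flatMap f).sum = (l.map (fun a => (f a).sum)).sum := by
  rw [List.flatMap, List.sum_flatten, List.map_map]; rfl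

lemma pvA_eq_ref (nums : List Int) : sum_of_distance nums = pvRef nums := by
  apply List.ext_getElem?
  intro k
  have h1 : sum_of_distance nums
      = ((PySem.List.pyRange 0 (nums.length : Int) 1).flatMap
           (fun i => (PySem.List.pyRange (i + 1) (nums.length : Int) 1).map (fun j => (i, j)))).foldl
          (fun im p =>
            if PySem.List.pyGetD nums p.1 0 = PySem.List.pyGetD nums p.2 0 then
              (im.modify p.1.toNat (· + |p.1 - p.2|)).modify p.2.toNat (· + |p.1 - p.2|)
            else im)
          (List.replicate nums.length 0) := by
    rw [sum_of_distance, List.foldl_flatMap]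
    simp only [List.foldl_map]
  rw [h1, pvA_fold_getElem]
  by_cases hk : k < nums.length
  case neg =>
    simp [pvRef, hk]
  case pos =>
  have hkn : (k : Int) < (nums.length : Int) := by exact_mod_cast hk
  simp only [pvRef, List.getElem?_map, List.getElem?_range, List.getElem?_replicate, hk, Option.map_some]
  rw [List.map_flatMap, pv_sum_flatMap]
  simp only [List.map_map, Function.comp_def]
  -- inner rewrite per i
  have inner_eq : ∀ i ∈ PySem.List.pyRange 0 (nums.length : Int) 1,
      (((PySem.List.pyRange (i + 1) (nums.length : Int) 1).map (fun j =>
        (if PySem.List.pyGetD nums i 0 = PySem.List.pyGetD nums j 0 ∧ i.toNat = k then |i - j| else 0)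
        + (if PySem.List.pyGetD nums i 0 = PySem.List.pyGetD nums j 0 ∧ j.toNat = k then |i - j| else 0))).sum)
      = ((if i = (k : Int) then
            ((PySem.List.pyRange ((k : Int) + 1) (nums.length : Int) 1).map (fun j =>
              if PySem.List.pyGetD nums (k : Int) 0 = PySem.List.pyGetD nums j 0 then |(k : Int) - j| else 0)).sum
          else 0)
        + (if i < (k : Int) then
            (if PySem.List.pyGetD nums i 0 = PySem.List.pyGetD nums (k : Int) 0 then |i - (k : Int)| else 0)
          else 0)) := by
    intro i hi
    have hi0 : 0 ≤ i := ((PySem.List.mem_pyRange_one).1 hi).1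
    rw [PySem.List.sum_map_add_int]
    congr 1
    · by_cases hik : i = (k : Int)
      · subst hik
        simp [Int.toNat_natCast]
      · have hz : ∀ j ∈ PySem.List.pyRange (i + 1) (nums.length : Int) 1,
            (if PySem.List.pyGetD nums i 0 = PySem.List.pyGetD nums j 0 ∧ i.toNat = k then |i - j| else 0) = 0 := by
          intro j _
          rw [if_neg]
          rintro ⟨-, h2⟩
          exact hik (by omega)
        rw [List.map_congr_left hz]
        simp [hik]
    · have step : ∀ j ∈ PySem.List.pyRange (i + 1) (nums.length : Int) 1,
          (if PySem.List.pyGetD nums i 0 = PySem.List.pyGetD nums j 0 ∧ j.toNat = k then |i - j| else 0)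
          = (if j = (k : Int) then (if PySem.List.pyGetD nums i 0 = PySem.List.pyGetD nums j 0 then |i - j| else 0) else 0) := by
        intro j hj
        have hj1 : i + 1 ≤ j := ((PySem.List.mem_pyRange_one).1 hj).1
        by_cases hjk : j = (k : Int)
        · subst hjk; simp [Int.toNat_natCast]
        · have hne : ¬ (j.toNat = k) := by omega
          simp [hjk, hne]
      rw [List.map_congr_left step, pvPick]
      by_cases hik : i < (k : Int)
      · rw [if_pos ⟨by omega, hkn⟩, if_pos hik]
      · rw [if_neg (fun h => hik (by omega)), if_neg hik]
  rw [List.map_congr_left inner_eq, PySem.List.sum_map_add_int, pvPick]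
  rw [if_pos ⟨by omega, hkn⟩]
  -- second sum: split the range at k
  rw [PySem.List.pyRange_one_append 0 (k : Int) (nums.length : Int) (by omega) (by omega),
    List.map_append, List.sum_append]
  have low : ∀ i ∈ PySem.List.pyRange 0 (k : Int) 1,
      (if i < (k : Int) then (if PySem.List.pyGetD nums i 0 = PySem.List.pyGetD nums (k : Int) 0 then |i - (k : Int)| else 0) else 0)
      = (if PySem.List.pyGetD nums i 0 = PySem.List.pyGetD nums (k : Int) 0 then |i - (k : Int)| else 0) := by
    intro i hi
    exact if_pos ((PySem.List.mem_pyRange_one).1 hi).2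
  have high : ∀ i ∈ PySem.List.pyRange (k : Int) (nums.length : Int) 1,
      (if i < (k : Int) then (if PySem.List.pyGetD nums i 0 = PySem.List.pyGetD nums (k : Int) 0 then |i - (k : Int)| else 0) else 0)
      = 0 := by
    intro i hi
    exact if_neg (by have := ((PySem.List.mem_pyRange_one).1 hi).1; omega)
  rw [List.map_congr_left low, List.map_congr_left high]
  simp only [List.map_const', List.sum_replicate, smul_zero, add_zero]
  -- now compute pvTK and match
  rw [pvTK, PySem.List.enumerate_eq_map_pyRange nums 0, List.map_map]
  have hlen : PySem.List.len nums = (nums.length : Int) := rfl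
  rw [hlen]
  rw [PySem.List.pyRange_one_append 0 (k : Int) (nums.length : Int) (by omega) (by omega),
    PySem.List.pyRange_one_cons (a := (k : Int)) (b := (nums.length : Int)) hkn,
    List.map_append, List.map_cons, List.sum_append, List.sum_cons]
  simp only [Function.comp_def, pvTerm, PySem.List.pyGetD_natCast]
  have e1 : ((PySem.List.pyRange ((k : Int) + 1) (nums.length : Int) 1).map (fun j =>
      if nums.getD k 0 = PySem.List.pyGetD nums j 0 then |(k : Int) - j| else 0)).sum
      = ((PySem.List.pyRange ((k : Int) + 1) (nums.length : Int) 1).map (fun j =>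
      if PySem.List.pyGetD nums j 0 = nums.getD k 0 then |(k : Int) - j| else 0)).sum := by
    apply congrArg
    exact List.map_congr_left (fun j _ => if_congr eq_comm rfl rfl)
  have e2 : ((PySem.List.pyRange 0 (k : Int) 1).map (fun i =>
      if PySem.List.pyGetD nums i 0 = nums.getD k 0 then |i - (k : Int)| else 0)).sum
      = ((PySem.List.pyRange 0 (k : Int) 1).map (fun i =>
      if PySem.List.pyGetD nums i 0 = nums.getD k 0 then |(k : Int) - i| else 0)).sum := by
    apply congrArg
    exact List.map_congr_left (fun i _ => by rw [abs_sub_comm])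
  rw [e1, e2]
  simp only [if_true, sub_self, abs_zero, Option.map_some]
  ring_nf

-- ---- B side ----

def pvCnt (h : List (Int × Int)) (v : Int) : Int := ((h.filter (fun q => q.2 == v)).length : Int)
def pvSm (h : List (Int × Int)) (v : Int) : Int := ((h.filter (fun q => q.2 == v)).map (·.1)).sum

def pvG (h : List (Int × Int)) : List (Int × Int) → List Int
  | [] => []
  | p :: rest => (pvCnt h p.2 * p.1 - pvSm h p.2) :: pvG (h ++ [p]) rest

lemma pvB_aux (l : List (Int × Int)) :
    ∀ (out : List Int) (d : PySem.Dict Int (Int × Int)) (h : List (Int × Int)),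
    (∀ v, d.getD v (0, 0) = (pvCnt h v, pvSm h v)) →
    (l.foldl (fun (st : List Int × PySem.Dict Int (Int × Int)) p =>
      let cs := st.2.getD p.2 (0, 0)
      (st.1 ++ [cs.1 * p.1 - cs.2], st.2.insert p.2 (cs.1 + 1, cs.2 + p.1))) (out, d)).1
    = out ++ pvG h l := by
  induction l with
  | nil => intro out d h _; simp [pvG]
  | cons p rest ih =>
    intro out d h hd
    simp only [List.foldl_cons]
    rw [ih (out ++ [(d.getD p.2 (0, 0)).1 * p.1 - (d.getD p.2 (0, 0)).2])
        (d.insert p.2 ((d.getD p.2 (0, 0)).1 + 1, (d.getD p.2 (0, 0)).2 + p.1)) (h ++ [p])]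
    · rw [hd p.2]
      simp [pvG, List.append_assoc]
    · intro v
      rw [PySem.Dict.getD_insert, hd p.2]
      by_cases hv : v = p.2
      · subst hv
        simp [pvCnt, pvSm, List.filter_append]
      · rw [if_neg hv, hd v]
        have : (fun q : Int × Int => q.2 == v) p = false := by simpa using fun h => hv h.symm
        simp [pvCnt, pvSm, List.filter_append, this]

lemma pv_pass_eq_G (l : List (Int × Int)) : pv_pass l = pvG [] l := by
  rw [pv_pass, pvB_aux l [] PySem.Dict.empty []]
  · simp
  · intro v; simp [pvCnt, pvSm]

lemma pvG_length (h l : List (Int × Int)) : (pvG h l).length = l.length := by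
  induction l generalizing h with
  | nil => rfl
  | cons p rest ih => simp [pvG, ih]

lemma pvG_getElem (l : List (Int × Int)) :
    ∀ (h : List (Int × Int)) (k : Nat),
    (pvG h l)[k]? = l[k]?.map (fun p =>
      pvCnt (h ++ l.take k) p.2 * p.1 - pvSm (h ++ l.take k) p.2) := by
  induction l with
  | nil => intro h k; simp [pvG]
  | cons p rest ih =>
    intro h k
    cases k with
    | zero => simp [pvG]
    | succ k =>
      simp only [pvG, List.getElem?_cons_succ, ih (h ++ [p]) k, List.take_succ_cons]
      congr 1
      rw [List.append_assoc]
      rfl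

lemma pv_sum_ite_filter (l : List (Int × Int)) (v : Int) (f : Int × Int → Int) :
    (l.map (fun p => if p.2 = v then f p else 0)).sum = ((l.filter (fun p => p.2 == v)).map f).sum := by
  induction l with
  | nil => simp
  | cons p rest ih => by_cases h : p.2 = v <;> simp [h, ih]

lemma pv_sum_sub (L : List (Int × Int)) (c : Int) :
    (L.map (fun p => c - p.1)).sum = (L.length : Int) * c - (L.map (·.1)).sum := by
  induction L with
  | nil => simp
  | cons p rest ih =>
    simp only [List.map_cons, List.sum_cons, ih, List.length_cons]
    push_cast
    ring

lemma pv_sum_sub' (L : List (Int × Int)) (c : Int) :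
    (L.map (fun p => p.1 - c)).sum = (L.map (·.1)).sum - (L.length : Int) * c := by
  induction L with
  | nil => simp
  | cons p rest ih =>
    simp only [List.map_cons, List.sum_cons, ih, List.length_cons]
    push_cast
    ring

lemma pvCnt_reverse (h : List (Int × Int)) (v : Int) : pvCnt h.reverse v = pvCnt h v := by
  simp [pvCnt, List.filter_reverse]

lemma pvSm_reverse (h : List (Int × Int)) (v : Int) : pvSm h.reverse v = pvSm h v := by
  simp [pvSm, List.filter_reverse, List.map_reverse]

lemma pvB_eq_ref (nums : List Int) : sum_of_distance_alt nums = pvRef nums := by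
  apply List.ext_getElem?
  intro k
  have hel : (PySem.List.enumerate nums).length = nums.length := PySem.List.length_enumerate nums 0
  by_cases hk : k < nums.length
  case neg =>
    have h1 : (sum_of_distance_alt nums).length = nums.length := by
      simp [sum_of_distance_alt, pv_pass_eq_G, pvG_length, hel]
    have h2 : (pvRef nums).length = nums.length := by simp [pvRef]
    rw [List.getElem?_eq_none (by omega), List.getElem?_eq_none (by omega)]
  case pos =>
  set e := PySem.List.enumerate nums with he
  set v := nums.getD k 0 with hv
  have hke : k < e.length := by omega
  have hek : e[k] = (0 + (k : Int), v) := by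
    rw [PySem.List.getElem_enumerate]
    simp [hv, List.getD_eq_getElem?_getD, List.getElem?_eq_getElem hk]
  -- the left sweep at k
  have hL : (pvG [] e)[k]? = some (pvCnt (e.take k) v * (0 + (k : Int)) - pvSm (e.take k) v) := by
    rw [pvG_getElem, List.getElem?_eq_getElem hke, hek]
    simp
  -- the reversed right sweep at k
  have hGr : (pvG [] e.reverse).length = e.length := by simp [pvG_length]
  have hRrev : ((pvG [] e.reverse).reverse)[k]? =
      some (pvCnt (e.drop (k + 1)) v * (0 + (k : Int)) - pvSm (e.drop (k + 1)) v) := by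
    rw [List.getElem?_reverse (by rw [hGr]; omega), hGr, pvG_getElem]
    have her : e.reverse[e.length - 1 - k]? = some (0 + (k : Int), v) := by
      rw [List.getElem?_reverse (by omega)]
      have hix : e.length - 1 - (e.length - 1 - k) = k := by omega
      simp only [hix]
      rw [List.getElem?_eq_getElem hke, hek]
    rw [her]
    have htk : (e.reverse.take (e.length - 1 - k)) = (e.drop (k + 1)).reverse := by
      rw [List.take_reverse]
      have hx : e.length - (e.length - 1 - k) = k + 1 := by omega
      rw [hx]
    simp only [Option.map_some, List.nil_append, htk, pvCnt_reverse, pvSm_reverse]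
  -- the output entry
  have hsoda : sum_of_distance_alt nums
      = ((pvG [] e).zip ((pvG [] e.reverse).reverse)).map (fun lr => lr.1 - lr.2) := by
    rw [sum_of_distance_alt, ← he, pv_pass_eq_G, pv_pass_eq_G]
  have hout : (sum_of_distance_alt nums)[k]? =
      some ((pvCnt (e.take k) v * (0 + (k : Int)) - pvSm (e.take k) v)
        - (pvCnt (e.drop (k + 1)) v * (0 + (k : Int)) - pvSm (e.drop (k + 1)) v)) := by
    have hlen1 : k < (pvG [] e).length := by rw [pvG_length]; omega
    have hlen2 : k < ((pvG [] e.reverse).reverse).length := by rw [List.length_reverse]; omega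
    have hlenz : k < (((pvG [] e).zip ((pvG [] e.reverse).reverse))).length := by
      rw [List.length_zip]; omega
    rw [hsoda, List.getElem?_map, List.getElem?_eq_getElem hlenz, List.getElem_zip]
    have e1 := hL; rw [List.getElem?_eq_getElem hlen1] at e1
    have e2 := hRrev; rw [List.getElem?_eq_getElem hlen2] at e2
    simp only [Option.some.injEq] at e1 e2
    simp only [Option.map_some, Option.some.injEq]
    rw [e1, e2]
  rw [hout, pvRef, List.getElem?_map, List.getElem?_range hk]
  have hmid : pvTerm nums k (0 + (k : Int), v) = 0 := by simp [pvTerm, hv]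
  have hsplit : e = e.take k ++ ((0 + (k : Int), v) :: e.drop (k + 1)) := by
    rw [← hek, ← List.drop_eq_getElem_cons hke, List.take_append_drop]
  have hTK : pvTK nums k
      = ((e.take k).map (pvTerm nums k)).sum + ((e.drop (k + 1)).map (pvTerm nums k)).sum := by
    rw [pvTK, ← he]
    conv_lhs => rw [hsplit]
    rw [List.map_append, List.sum_append, List.map_cons, List.sum_cons, hmid, zero_add]
  have habs_t : ∀ p ∈ (e.take k).filter (fun p => p.2 == v), |(k : Int) - p.1| = (k : Int) - p.1 := by
    intro p hp
    obtain ⟨i, hi, rfl⟩ := List.mem_iff_getElem.1 (List.mem_filter.1 hp).1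
    have hik : i < k := by simp at hi; omega
    have hie : i < e.length := by simp at hi; omega
    rw [List.getElem_take, PySem.List.getElem_enumerate nums 0 i hie]
    simp only
    rw [abs_of_nonneg (by omega)]
  have habs_d : ∀ p ∈ (e.drop (k + 1)).filter (fun p => p.2 == v), |(k : Int) - p.1| = p.1 - (k : Int) := by
    intro p hp
    obtain ⟨i, hi, rfl⟩ := List.mem_iff_getElem.1 (List.mem_filter.1 hp).1
    have hie : k + 1 + i < e.length := by simp at hi; omega
    rw [List.getElem_drop, PySem.List.getElem_enumerate nums 0 (k + 1 + i) hie]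
    simp only
    rw [abs_of_nonpos (by omega)]
    ring
  have hTt : ((e.take k).map (pvTerm nums k)).sum
      = pvCnt (e.take k) v * (k : Int) - pvSm (e.take k) v := by
    rw [show pvTerm nums k = (fun p => if p.2 = v then |(k : Int) - p.1| else 0) from rfl]
    rw [pv_sum_ite_filter]
    rw [List.map_congr_left habs_t, pv_sum_sub]
    simp [pvCnt, pvSm, mul_comm]
  have hTd : ((e.drop (k + 1)).map (pvTerm nums k)).sum
      = pvSm (e.drop (k + 1)) v - pvCnt (e.drop (k + 1)) v * (k : Int) := by
    rw [show pvTerm nums k = (fun p => if p.2 = v then |(k : Int) - p.1| else 0) from rfl]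
    rw [pv_sum_ite_filter]
    rw [List.map_congr_left habs_d, pv_sum_sub']
    simp [pvCnt, pvSm, mul_comm]
  simp only [Option.map_some, Option.some.injEq]
  rw [hTK, hTt, hTd]
  ring


-- ===== VERDICT (by name: the statement is the Claim_ definition above) =====
theorem sum_of_distance_spec : Claim_equal_sum_of_distance := by
  intro nums _
  unfold Spec_sum_of_distance
  rw [pvA_eq_ref, pvB_eq_ref]
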